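-- pv_equiv track=rewrite | github.com/matheusaragaofs/desafiosDaFaculdade | L5Q4 - Números Mágicos.py | repetir_mdc
-- ===== SOURCE A (Python) =====
-- def mdc(a, b):
--   if(b == 0):
--     return a
--   else:
--     return mdc(b,a % b)
--
-- def repetir_mdc(sequencia):
--   if len(sequencia) == 1:
--     maior = sequencia[0]
--   else:
--     maior = mdc(sequencia[0], sequencia[1])
--     for i in range(2, len(sequencia)):
--       maior = mdc(maior, sequencia[i])
--   return maior
-- ===== SOURCE B (Python) =====
-- def mdc_iter(a, b):
--     while b:
--         a, b = b, a % b
--     return a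
--
-- def repetir_mdc(sequencia):
--     acc = sequencia[0]
--     for x in sequencia[1:]:
--         acc = mdc_iter(acc, x)
--     return acc
-- ===== Notes on version B (the rewrite author's own statement) =====
-- stated objective: simpler
-- what changed: The recursive Euclidean helper becomes an iterative while-loop (a, b = b, a % b), and the special-cased length-1 branch plus the index-based range loop are replaced by a single fold of the helper over the tail of the sequence starting from its first element.
-- outside the precondition, e.g. on repetir_mdc([]): A raises IndexError, B raises IndexError
import Mathlib
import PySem

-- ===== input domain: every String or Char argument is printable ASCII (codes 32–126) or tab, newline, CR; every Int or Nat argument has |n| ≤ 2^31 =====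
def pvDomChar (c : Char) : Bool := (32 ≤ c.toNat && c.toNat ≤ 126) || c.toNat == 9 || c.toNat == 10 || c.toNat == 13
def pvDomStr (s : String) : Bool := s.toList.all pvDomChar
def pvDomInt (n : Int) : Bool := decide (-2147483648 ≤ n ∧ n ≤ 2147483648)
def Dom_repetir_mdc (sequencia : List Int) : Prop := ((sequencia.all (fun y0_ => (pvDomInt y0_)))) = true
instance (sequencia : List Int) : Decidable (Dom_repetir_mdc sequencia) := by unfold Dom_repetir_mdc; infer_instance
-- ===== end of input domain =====

-- B replaces the recursive Euclidean helper by an iterative while-loop and the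
-- length-1 special case plus index-based range loop by one fold over the tail;
-- objective: simpler, same cost.

-- termination fact used by both ports (Python's % has the divisor's sign and |a % b| < |b| for b ≠ 0)
theorem pymod_natAbs_lt (a b : Int) (hb : b ≠ 0) :
    (PySem.Int.mod a b).natAbs < b.natAbs := by
  rcases lt_or_gt_of_ne hb with h | h
  · have := PySem.Int.mod_neg_bounds a h
    omega
  · have h1 := PySem.Int.mod_nonneg a h
    have h2 := PySem.Int.mod_lt a h
    omega

-- ===== PORT A =====
def mdc (a b : Int) : Int :=
  if b = 0 then a else mdc b (PySem.Int.mod a b)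
termination_by b.natAbs
decreasing_by exact pymod_natAbs_lt a b (by assumption)

def repetir_mdc (sequencia : List Int) : Int :=
  if sequencia.length = 1 then
    PySem.List.pyGetD sequencia 0 0
  else
    let maior := mdc (PySem.List.pyGetD sequencia 0 0) (PySem.List.pyGetD sequencia 1 0)
    (PySem.List.pyRange 2 (sequencia.length : Int) 1).foldl
      (fun maior i => mdc maior (PySem.List.pyGetD sequencia i 0)) maior

-- ===== PORT B =====
-- 'while b: a, b = b, a % b; return a'
def mdc_iter (a b : Int) : Int :=
  if b = 0 then a else mdc_iter b (PySem.Int.mod a b)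
termination_by b.natAbs
decreasing_by exact pymod_natAbs_lt a b (by assumption)

def repetir_mdc_alt (sequencia : List Int) : Int :=
  match sequencia with
  | [] => 0          -- unreachable: Pre_ excludes []; Python raises IndexError here
  | acc :: rest => rest.foldl mdc_iter acc

-- ===== PRECONDITION & SPEC =====
-- A (and B) raise IndexError on the empty list.
def Pre_repetir_mdc (sequencia : List Int) : Prop := sequencia ≠ []
instance (sequencia : List Int) : Decidable (Pre_repetir_mdc sequencia) := by
  unfold Pre_repetir_mdc; infer_instance
def pvWitness_repetir_mdc : List Int := [12, -18, 30]

def Spec_repetir_mdc (sequencia : List Int) (out : Int) : Prop := out = repetir_mdc_alt sequencia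
instance (sequencia : List Int) (out : Int) : Decidable (Spec_repetir_mdc sequencia out) := by unfold Spec_repetir_mdc; infer_instance

-- ===== CLAIM (what is proved, stated in full; the proofs are below) =====
def Claim_equal_repetir_mdc : Prop := ∀ (sequencia : List Int), Dom_repetir_mdc sequencia → Pre_repetir_mdc sequencia → Spec_repetir_mdc sequencia (repetir_mdc sequencia)

-- ===== LEMMAS AND PROOFS =====

theorem mdc_zero (a : Int) : mdc a 0 = a := by rw [mdc]; simp

theorem mdc_ne (a b : Int) (h : b ≠ 0) : mdc a b = mdc b (PySem.Int.mod a b) := by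
  rw [mdc]; simp [h]

theorem mdc_iter_eq_mdc (a b : Int) : mdc_iter a b = mdc a b := by
  fun_induction mdc_iter a b with
  | case1 a => rw [mdc_zero]
  | case2 a b h ih => rw [mdc_ne a b h, ih]

-- ===== VERDICT (by name: the statement is the Claim_ definition above) =====
theorem repetir_mdc_spec : Claim_equal_repetir_mdc := by
  intro s _ hpre
  unfold Spec_repetir_mdc
  match s with
  | [] => exact absurd rfl hpre
  | [x] =>
    simp [repetir_mdc, repetir_mdc_alt, PySem.List.pyGetD]
  | x :: y :: t =>
    have hlen : (x :: y :: t).length ≠ 1 := by simp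
    have hfold : (PySem.List.pyRange 2 ((x :: y :: t).length : Int) 1).foldl
        (fun m i => mdc m (PySem.List.pyGetD (x :: y :: t) i 0))
        (mdc (PySem.List.pyGetD (x :: y :: t) 0 0) (PySem.List.pyGetD (x :: y :: t) 1 0))
        = ((x :: y :: t).drop 2).foldl mdc
          (mdc (PySem.List.pyGetD (x :: y :: t) 0 0) (PySem.List.pyGetD (x :: y :: t) 1 0)) := by
      have := PySem.List.foldl_pyRange_pyGetD' (xs := x :: y :: t) (f := mdc) (d := 0)
        (a := 2) (init := mdc (PySem.List.pyGetD (x :: y :: t) 0 0) (PySem.List.pyGetD (x :: y :: t) 1 0))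
        (by norm_num)
      simpa using this
    simp only [repetir_mdc, hlen, repetir_mdc_alt, if_false]
    rw [hfold]
    simp only [PySem.List.pyGetD, List.drop_succ_cons, List.drop_zero, List.foldl_cons]
    simp [PySem.List.pyGet?, PySem.List.pyIdx?]
    rw [mdc_iter_eq_mdc]
    symm
    apply PySem.List.foldl_congr_mem
    intro acc z _
    exact mdc_iter_eq_mdc acc z
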